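-- pv_equiv track=rewrite | github.com/zcnm/competitive_coding_excercises | codeforces/Codeforces Round #811 (Div. 3)/B.py | solve
-- ===== SOURCE A (Python) =====
-- def solve(n, nums):
--     seen = {}
--     count = 0
--     for num in reversed(nums):
--         if num in seen:
--             return n - count
--         else:
--             seen[num] = 1
--             count += 1
--     return 0
-- ===== SOURCE B (Python) =====
-- def solve(n, nums):
--     last = {}
--     d = -1
--     for i, v in enumerate(nums):
--         if v in last:
--             d = max(d, last[v])
--         last[v] = i
--     if d < 0:
--         return 0
--     return n - (len(nums) - 1 - d)
-- ===== Notes on version B (the rewrite author's own statement) =====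
-- stated objective: alternative
-- what changed: Replaces A's reversed scan with early return and a seen-set by a single forward enumerate pass that keeps each value's most recent index in a dict and the maximum index having a later duplicate, converting that index to the answer with one arithmetic step at the end.
import Mathlib
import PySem

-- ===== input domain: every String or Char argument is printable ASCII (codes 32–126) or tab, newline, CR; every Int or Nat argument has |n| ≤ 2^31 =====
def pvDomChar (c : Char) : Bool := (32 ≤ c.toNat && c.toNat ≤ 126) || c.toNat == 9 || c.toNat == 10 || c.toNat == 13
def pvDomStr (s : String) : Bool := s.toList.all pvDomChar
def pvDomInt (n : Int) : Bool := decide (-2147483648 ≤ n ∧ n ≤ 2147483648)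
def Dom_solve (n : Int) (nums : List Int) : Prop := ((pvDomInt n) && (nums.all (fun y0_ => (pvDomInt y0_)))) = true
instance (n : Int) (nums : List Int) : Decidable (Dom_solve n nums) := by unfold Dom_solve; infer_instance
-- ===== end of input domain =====

-- B replaces A's reversed early-return scan by one forward enumerate pass tracking last indices and the max duplicate index (alternative decomposition, same cost).


-- ===== PORT A =====
-- A's for-loop over reversed(nums) with early return, seen dict and running count
def solveLoop (n : Int) : List Int → PySem.Dict Int Int → Int → Int
  | [], _, _ => 0
  | num :: rest, seen, count =>
    if seen.contains num then n - count
    else solveLoop n rest (seen.insert num 1) (count + 1)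

def solve (n : Int) (nums : List Int) : Int :=
  solveLoop n nums.reverse PySem.Dict.empty 0

-- ===== PORT B =====
-- one enumerate step of Source B's loop: update max duplicate index d, then last[v] = i
def solveAltStep (st : PySem.Dict Int Int × Int) (p : Int × Int) : PySem.Dict Int Int × Int :=
  let d' := if st.1.contains p.2 then max st.2 (st.1.getD p.2 0) else st.2
  (st.1.insert p.2 p.1, d')

def solve_alt (n : Int) (nums : List Int) : Int :=
  let st := (PySem.List.enumerate nums 0).foldl solveAltStep (PySem.Dict.empty, -1)
  if st.2 < 0 then 0 else n - ((nums.length : Int) - 1 - st.2)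

-- ===== PRECONDITION & SPEC =====
def Spec_solve (n : Int) (nums : List Int) (out : Int) : Prop := out = solve_alt n nums
instance (n : Int) (nums : List Int) (out : Int) : Decidable (Spec_solve n nums out) := by unfold Spec_solve; infer_instance

-- ===== CLAIM (what is proved, stated in full; the proofs are below) =====
def Claim_equal_solve : Prop := ∀ (n : Int) (nums : List Int), Dom_solve n nums → Spec_solve n nums (solve n nums)

-- ===== LEMMAS AND PROOFS =====

-- proof-side reference: index of the last element of l that has a later duplicate (none if l has no duplicate)
def gDup : List Int → Option Nat
  | [] => none
  | x :: xs =>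
    match gDup xs with
    | some d => some (d + 1)
    | none => if x ∈ xs then some 0 else none

-- proof-side reference: A's loop on list rs with seen-keys K: position of first repeat
def goRep : List Int → List Int → Option Nat
  | [], _ => none
  | x :: xs, K => if x ∈ K then some 0 else (goRep xs (x :: K)).map (· + 1)

-- proof-side reference: index of last occurrence of v in l
def lastIdx : List Int → Int → Option Nat
  | [], _ => none
  | x :: xs, v =>
    match lastIdx xs v with
    | some i => some (i + 1)
    | none => if v = x then some 0 else none

def combine : Option Nat → Option Nat → Option Nat
  | none, r => r
  | some L, none => some L
  | some L, some d => some (max d L)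

theorem lastIdx_cons (y : Int) (ys : List Int) (v : Int) :
    lastIdx (y :: ys) v = match lastIdx ys v with
      | some i => some (i + 1) | none => if v = y then some 0 else none := rfl

theorem gDup_cons (y : Int) (ys : List Int) :
    gDup (y :: ys) = match gDup ys with
      | some d => some (d + 1) | none => if y ∈ ys then some 0 else none := rfl

theorem solveLoop_eq_goRep (n : Int) :
    ∀ (rs : List Int) (S : PySem.Dict Int Int) (c : Int) (K : List Int),
      (∀ x : Int, S.contains x = decide (x ∈ K)) →
      solveLoop n rs S c =
        match goRep rs K with
        | none => 0
        | some k => n - (c + k) := by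
  intro rs
  induction rs with
  | nil => intro S c K h; simp [solveLoop, goRep]
  | cons x xs ih =>
    intro S c K h
    by_cases hx : x ∈ K
    · simp [solveLoop, goRep, h, hx]
    · have hcontains : S.contains x = false := by simp [h, hx]
      have hkeys : ∀ y : Int, (S.insert x 1).contains y = decide (y ∈ x :: K) := by
        intro y
        rw [PySem.Dict.contains_insert, h]
        by_cases hyx : y = x <;> simp [hyx, hx]
      rw [solveLoop, if_neg (by simp [hcontains]), ih _ _ _ hkeys]
      simp only [goRep, if_neg hx]
      cases goRep xs (x :: K) with
      | none => simp
      | some k => simp [Option.map]; ring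

theorem lastIdx_eq_none_iff (l : List Int) (v : Int) : lastIdx l v = none ↔ v ∉ l := by
  induction l with
  | nil => simp [lastIdx]
  | cons x xs ih =>
    simp only [lastIdx, List.mem_cons]
    cases h : lastIdx xs v with
    | some i =>
      have hv : v ∈ xs := by
        by_contra hc
        rw [ih.mpr hc] at h
        cases h
      simp [hv]
    | none =>
      have hv : v ∉ xs := ih.mp h
      by_cases hvx : v = x <;> simp [hvx, hv]

theorem gDup_eq_none_iff (l : List Int) : gDup l = none ↔ l.Nodup := by
  induction l with
  | nil => simp [gDup]
  | cons x xs ih =>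
    simp only [gDup]
    cases h : gDup xs with
    | some d =>
      have hnot : ¬ xs.Nodup := by rw [← ih]; simp [h]
      simp [List.nodup_cons, hnot]
    | none =>
      have hnd : xs.Nodup := ih.mp h
      by_cases hx : x ∈ xs <;> simp [hx, hnd]

theorem gDup_props : ∀ (l : List Int) (d : Nat), gDup l = some d →
    ∃ hd : d < l.length, l[d] ∈ l.drop (d + 1) ∧ (l.drop (d + 1)).Nodup := by
  intro l
  induction l with
  | nil => intro d h; simp [gDup] at h
  | cons x xs ih =>
    intro d h
    cases hg : gDup xs with
    | some e =>
      simp only [gDup, hg] at h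
      obtain rfl : e + 1 = d := by simpa using h
      obtain ⟨he, hm, hn⟩ := ih e hg
      exact ⟨by simpa using he, by simpa using hm, by simpa using hn⟩
    | none =>
      simp only [gDup, hg] at h
      by_cases hx : x ∈ xs
      · rw [if_pos hx] at h
        obtain rfl : 0 = d := by simpa using h
        exact ⟨by simp, by simpa using hx, by simpa using (gDup_eq_none_iff xs).mp hg⟩
      · rw [if_neg hx] at h; cases h

theorem goRep_of_nodup : ∀ (l : List Int) (K : List Int),
    l.Nodup → (∀ y ∈ l, y ∉ K) → goRep l K = none := by
  intro l
  induction l with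
  | nil => intro K _ _; rfl
  | cons x xs ih =>
    intro K hnd hK
    have hx : x ∉ K := hK x (by simp)
    have h2 : ∀ y ∈ xs, y ∉ x :: K := by
      intro y hy
      simp only [List.mem_cons, not_or]
      exact ⟨fun he => (List.nodup_cons.mp hnd).1 (he ▸ hy), hK y (List.mem_cons_of_mem _ hy)⟩
    rw [goRep, if_neg hx, ih (x :: K) (List.nodup_cons.mp hnd).2 h2]
    rfl

theorem goRep_of_props : ∀ (l : List Int) (k : Nat) (K : List Int) (hk : k < l.length),
    (l.take k).Nodup → (∀ y ∈ l.take k, y ∉ K) → (l[k] ∈ K ∨ l[k] ∈ l.take k) →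
    goRep l K = some k := by
  intro l
  induction l with
  | nil => intro k K hk; simp at hk
  | cons x xs ih =>
    intro k K hk hnd hK hmem
    cases k with
    | zero =>
      have hx : x ∈ K := by simpa using hmem
      simp [goRep, hx]
    | succ k' =>
      have hxK : x ∉ K := hK x (by simp)
      simp only [List.take_succ_cons, List.nodup_cons] at hnd
      obtain ⟨hxnot, hnd'⟩ := hnd
      have hK' : ∀ y ∈ xs.take k', y ∉ x :: K := by
        intro y hy
        simp only [List.mem_cons, not_or]
        exact ⟨fun he => hxnot (he ▸ hy), hK y (by simp [List.take_succ_cons, hy])⟩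
      have hmem' : xs[k']'(by simpa using hk) ∈ x :: K ∨ xs[k']'(by simpa using hk) ∈ xs.take k' := by
        simp only [List.getElem_cons_succ, List.take_succ_cons, List.mem_cons] at hmem
        rcases hmem with h | h | h
        · exact Or.inl (by simp [h])
        · exact Or.inl (by simp [h])
        · exact Or.inr h
      rw [goRep, if_neg hxK, ih k' (x :: K) (by simpa using hk) hnd' hK' hmem']
      rfl

theorem goRep_reverse (p : List Int) :
    goRep p.reverse [] = (gDup p).map (fun d => p.length - 1 - d) := by
  cases h : gDup p with
  | none =>
    have hnd : p.Nodup := (gDup_eq_none_iff p).mp h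
    simp [goRep_of_nodup p.reverse [] (by simpa using hnd) (by simp)]
  | some d =>
    obtain ⟨hd, hmem, hnd⟩ := gDup_props p d h
    have hk : p.length - 1 - d < p.reverse.length := by rw [List.length_reverse]; omega
    have hdidx : p.length - (p.length - 1 - d) = d + 1 := by omega
    have htake : p.reverse.take (p.length - 1 - d) = (p.drop (d + 1)).reverse := by
      rw [List.take_reverse, hdidx]
    have hidx : p.length - 1 - (p.length - 1 - d) = d := by omega
    have hget : p.reverse[p.length - 1 - d]'hk = p[d]'hd := by
      rw [List.getElem_reverse]
      congr 1
    rw [goRep_of_props p.reverse (p.length - 1 - d) [] hk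
      (by rw [htake]; exact List.nodup_reverse.mpr hnd)
      (by simp)
      (by right; rw [htake, hget, List.mem_reverse]; exact hmem)]
    simp

theorem lastIdx_snoc (ys : List Int) (x v : Int) :
    lastIdx (ys ++ [x]) v = if v = x then some ys.length else lastIdx ys v := by
  induction ys with
  | nil => by_cases h : v = x <;> simp [lastIdx, h]
  | cons y ys ih =>
    rw [List.cons_append, lastIdx, ih]
    by_cases h : v = x
    · simp [h]
    · simp only [if_neg h]
      rfl

theorem gDup_snoc (ys : List Int) (x : Int) :
    gDup (ys ++ [x]) = combine (lastIdx ys x) (gDup ys) := by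
  induction ys with
  | nil => simp [gDup, lastIdx, combine]
  | cons y ys ih =>
    rw [List.cons_append, gDup_cons, ih, gDup_cons, lastIdx_cons]
    cases hL : lastIdx ys x with
    | some L =>
      cases hg : gDup ys with
      | some d => simp [combine, Nat.add_max_add_right]
      | none => by_cases hy : y ∈ ys <;> simp [combine, hy]
    | none =>
      have hxys : x ∉ ys := (lastIdx_eq_none_iff ys x).mp hL
      cases hg : gDup ys with
      | some d => by_cases hxy : x = y <;> simp [combine, hxy]
      | none =>
        by_cases hxy : x = y
        · simp [combine, ← hxy, hxys]
        · by_cases hy : y ∈ ys <;> simp [combine, hxy, Ne.symm hxy, hy]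

theorem foldl_invariant (p : List Int) :
    (∀ v : Int, ((PySem.List.enumerate p 0).foldl solveAltStep (PySem.Dict.empty, -1)).1.get? v
        = (lastIdx p v).map Int.ofNat) ∧
      ((PySem.List.enumerate p 0).foldl solveAltStep (PySem.Dict.empty, -1)).2
        = (match gDup p with | none => -1 | some d => (d : Int)) := by
  induction p using List.reverseRecOn with
  | nil =>
    constructor
    · intro v; simp [PySem.List.enumerate, lastIdx]
    · simp [PySem.List.enumerate, gDup]
  | append_singleton ys x ih =>
    obtain ⟨ih1, ih2⟩ := ih
    have hstep : (PySem.List.enumerate (ys ++ [x]) 0).foldl solveAltStep (PySem.Dict.empty, -1)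
        = solveAltStep ((PySem.List.enumerate ys 0).foldl solveAltStep (PySem.Dict.empty, -1))
            (0 + (ys.length : Int), x) := by
      rw [PySem.List.enumerate_append, List.foldl_append]
      rfl
    set st := (PySem.List.enumerate ys 0).foldl solveAltStep (PySem.Dict.empty, -1) with hst
    have hcont : st.1.contains x = (lastIdx ys x).isSome := by
      rw [PySem.Dict.contains_eq_isSome_get?, ih1 x]
      cases lastIdx ys x <;> rfl
    constructor
    · intro v
      rw [hstep]
      show (st.1.insert x (0 + (ys.length : Int))).get? v = _
      rw [PySem.Dict.get?_insert, lastIdx_snoc]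
      by_cases hv : v = x
      · simp [hv]
      · simp [hv, ih1 v]
    · rw [hstep, gDup_snoc]
      show (if st.1.contains x then max st.2 (st.1.getD x 0) else st.2) = _
      cases hL : lastIdx ys x with
      | none => rw [hcont, hL]; simpa [combine] using ih2
      | some L =>
        have hgetD : st.1.getD x 0 = (L : Int) := by
          rw [PySem.Dict.getD_eq_get?_getD, ih1 x, hL]
          rfl
        rw [hcont, hL]
        simp only [Option.isSome_some, if_pos]
        rw [hgetD, ih2]
        cases hg : gDup ys with
        | none =>
          simp only [combine]
          omega
        | some d =>
          simp only [combine]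
          rw [Nat.cast_max]

-- ===== VERDICT (by name: the statement is the Claim_ definition above) =====
theorem solve_spec : Claim_equal_solve := by
  intro n nums _
  show solve n nums = solve_alt n nums
  obtain ⟨h1, h2⟩ := foldl_invariant nums
  rw [solve, solveLoop_eq_goRep n nums.reverse PySem.Dict.empty 0 [] (by intro x; simp),
    goRep_reverse]
  show _ = (let st := (PySem.List.enumerate nums 0).foldl solveAltStep (PySem.Dict.empty, -1);
    if st.2 < 0 then 0 else n - ((nums.length : Int) - 1 - st.2))
  simp only [h2]
  cases hg : gDup nums with
  | none => simp
  | some d =>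
    obtain ⟨hd, -, -⟩ := gDup_props nums d hg
    have hnn : ¬ ((d : Int) < 0) := by omega
    simp only [Option.map_some]
    rw [if_neg hnn]
    have hc : ((nums.length - 1 - d : Nat) : Int) = (nums.length : Int) - 1 - (d : Int) := by
      rw [Nat.sub_sub, Nat.cast_sub (by omega)]
      push_cast
      ring
    rw [hc]
    ring
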